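-- pv_equiv track=rewrite | github.com/jaehyeon98/mailalgo | 고재현/week3_backtracking/1941_소문난 칠공주.py | bfs
-- ===== SOURCE A (Python) =====
-- from collections import deque
--
-- def bfs(c):
--     visit = [False]*7
--     q = deque()
--     q.append(c[0])
--     visit[0] = True
--
--     while q:
--         i,j = q.popleft()
--         for k in range(4):
--             ni,nj = i+di[k], j+dj[k]
--             if (ni,nj) in c:
--                 check_visit = c.index((ni,nj))
--                 if not visit[check_visit]:
--                     q.append((ni,nj))
--                     visit[check_visit] = True
--
--     for b in visit:
--         if b == False:
--             return False
--     return True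
--
-- di = [1,0,-1,0]
--
-- dj = [0,1,0,-1]
-- ===== SOURCE B (Python) =====
-- # Connectivity by round-based saturation over the cell set instead of a BFS queue;
-- # rejects non-7-cell or duplicate inputs up front.
-- di = [1, 0, -1, 0]
-- dj = [0, 1, 0, -1]
--
-- def bfs(c):
--     if len(c) != 7 or len(set(c)) != 7:
--         return False
--     reached = {c[0]}
--     for _ in range(7):
--         for i, j in c:
--             if (i, j) not in reached and any((i + di[k], j + dj[k]) in reached for k in range(4)):
--                 reached.add((i, j))
--     return len(reached) == 7
-- ===== Notes on version B (the rewrite author's own statement) =====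
-- stated objective: simpler
-- what changed: Replaces the deque-based BFS over a fixed 7-slot visit array (with repeated list.index scans) by an upfront length/duplicate rejection followed by a bounded round-based saturation of a reached coordinate set.
import Mathlib
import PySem

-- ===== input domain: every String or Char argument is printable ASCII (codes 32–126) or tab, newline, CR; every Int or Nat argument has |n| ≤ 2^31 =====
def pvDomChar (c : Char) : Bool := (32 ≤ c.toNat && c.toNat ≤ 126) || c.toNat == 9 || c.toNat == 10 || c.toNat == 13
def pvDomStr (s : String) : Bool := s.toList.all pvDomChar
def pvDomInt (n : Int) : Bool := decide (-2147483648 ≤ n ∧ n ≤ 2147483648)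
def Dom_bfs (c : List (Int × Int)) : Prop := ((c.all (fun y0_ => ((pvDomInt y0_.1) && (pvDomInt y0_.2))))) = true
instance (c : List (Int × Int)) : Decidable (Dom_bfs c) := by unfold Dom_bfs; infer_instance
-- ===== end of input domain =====

-- B replaces A's queue BFS over visit slots by a round-based saturation of a reached
-- coordinate set with an upfront length/duplicate rejection (objective: simpler).

-- ===== PORT A =====
def pyDi : List Int := [1, 0, -1, 0]
def pyDj : List Int := [0, 1, 0, -1]

-- body of Python's `for k in range(4)` for the popped cell (i, j); state = (queue, visit)
def stepA (c : List (Int × Int)) (i j : Int) (st : List (Int × Int) × List Bool) (k : Nat) :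
    List (Int × Int) × List Bool :=
  let ni := i + pyDi.getD k 0
  let nj := j + pyDj.getD k 0
  if (ni, nj) ∈ c then
    match PySem.List.index? c (ni, nj) with
    | some cv =>
      match st.2[cv]? with
      | some v => if v = false then (st.1 ++ [(ni, nj)], st.2.set cv true) else st
      | none => st   -- Python raises IndexError here (visit[cv] with cv ≥ 7); outside Pre_bfs
    | none => st     -- unreachable: membership was checked just before
  else st

-- Python's `while q:`; the fuel only makes it total: 16 exceeds the possible number of
-- pops on EVERY input (each enqueue after the first flips one of the 7 visit slots).
def loopA (c : List (Int × Int)) : Nat → List (Int × Int) → List Bool → List Bool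
  | _, [], visit => visit
  | 0, _ :: _, visit => visit
  | fuel + 1, (i, j) :: qs, visit =>
      let st := (List.range 4).foldl (stepA c i j) (qs, visit)
      loopA c fuel st.1 st.2

def bfs (c : List (Int × Int)) : Bool :=
  match PySem.List.pyGet? c 0 with
  | none => false   -- c[0] raises IndexError on the empty list; outside Pre_bfs
  | some p0 =>
    let visit := (List.replicate 7 false).set 0 true
    (loopA c 16 [p0] visit).all (fun b => b)

-- ===== PORT B =====
-- body of Source B's inner `for i, j in c`: add p to the reached set if unreached and 4-adjacent to it
def stepB (r : PySem.Set (Int × Int)) (p : Int × Int) : PySem.Set (Int × Int) :=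
  if p ∉ r ∧ ((List.range 4).any fun k =>
      (p.1 + pyDi.getD k 0, p.2 + pyDj.getD k 0) ∈ r) = true
  then PySem.Set.add r p else r

-- one pass of Source B's inner loop over the reached set
def passB (c : List (Int × Int)) (r : PySem.Set (Int × Int)) : PySem.Set (Int × Int) :=
  c.foldl stepB r

def bfs_alt (c : List (Int × Int)) : Bool :=
  if c.length = 7 ∧ (PySem.Set.ofList c).length = 7 then
    match c with
    | [] => false   -- unreachable: c.length = 7
    | p0 :: _ =>
      let reached := (List.range 7).foldl (fun r _ => passB c r) (PySem.Set.ofList [p0])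
      decide (reached.length = 7)
  else false

-- ===== PRECONDITION & SPEC =====
-- Pre_ excludes the empty list (c[0] raises IndexError) and lists longer than 7, on which
-- A's fixed 7-slot visit array either raises IndexError or silently ignores the extra cells.
def Pre_bfs (c : List (Int × Int)) : Prop := c ≠ [] ∧ c.length ≤ 7
instance (c : List (Int × Int)) : Decidable (Pre_bfs c) := by unfold Pre_bfs; infer_instance
def pvWitness_bfs : (List (Int × Int)) := [(0, 0), (0, 1), (0, 2), (0, 3), (0, 4), (0, 5), (0, 6)]

def Spec_bfs (c : List (Int × Int)) (out : Bool) : Prop := out = bfs_alt c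
instance (c : List (Int × Int)) (out : Bool) : Decidable (Spec_bfs c out) := by unfold Spec_bfs; infer_instance

-- ===== CLAIM (what is proved, stated in full; the proofs are below) =====
def Claim_equal_bfs : Prop := ∀ (c : List (Int × Int)), Dom_bfs c → Pre_bfs c → Spec_bfs c (bfs c)

-- ===== LEMMAS AND PROOFS =====

-- adjacency via the global offset lists, as both programs test it
def adjB (p q : Int × Int) : Bool :=
  (List.range 4).any fun k => decide (q = (p.1 + pyDi.getD k 0, p.2 + pyDj.getD k 0))

-- reachability from s through cells of c: the common semantics of both loops
inductive Reach (c : List (Int × Int)) (s : Int × Int) : (Int × Int) → Prop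
  | refl : Reach c s s
  | tail {p q : Int × Int} : Reach c s p → q ∈ c → adjB p q = true → Reach c s q

lemma adjB_intro (p : Int × Int) (k : Nat) (hk : k < 4) :
    adjB p (p.1 + pyDi.getD k 0, p.2 + pyDj.getD k 0) = true := by
  simp only [adjB, List.any_eq_true, List.mem_range]
  exact ⟨k, hk, by simp⟩

lemma adjB_elim {p q : Int × Int} (h : adjB p q = true) :
    ∃ k, k < 4 ∧ q = (p.1 + pyDi.getD k 0, p.2 + pyDj.getD k 0) := by
  simp only [adjB, List.any_eq_true, List.mem_range, decide_eq_true_eq] at h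
  exact h

lemma adjB_true_iff (p q : Int × Int) : adjB p q = true ↔
    (q.1 = p.1 + 1 ∧ q.2 = p.2) ∨ (q.1 = p.1 ∧ q.2 = p.2 + 1) ∨
    (q.1 = p.1 - 1 ∧ q.2 = p.2) ∨ (q.1 = p.1 ∧ q.2 = p.2 - 1) := by
  have h4 : List.range 4 = [0, 1, 2, 3] := rfl
  simp only [adjB, h4, List.any_cons, List.any_nil, Bool.or_eq_true, Bool.or_false,
    decide_eq_true_eq, pyDi, pyDj, List.getD, List.getElem?_cons_zero, List.getElem?_cons_succ,
    Option.getD_some, Prod.ext_iff]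
  omega

lemma adjB_comm (p q : Int × Int) : adjB p q = adjB q p := by
  have h1 := adjB_true_iff p q
  have h2 := adjB_true_iff q p
  cases ha : adjB p q <;> cases hb : adjB q p <;> simp_all <;> omega

-- coordinate p is marked in visit list v (via its first-occurrence index in c)
def markedC (c : List (Int × Int)) (v : List Bool) (p : Int × Int) : Prop :=
  ∃ k : Nat, PySem.List.index? c p = some k ∧ v.getD k false = true

-- v's true slots are contained in w's
def visitLe (v w : List Bool) : Prop := ∀ k, v.getD k false = true → w.getD k false = true

lemma visitLe_refl (v : List Bool) : visitLe v v := fun _ h => h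

lemma visitLe_trans {u v w : List Bool} (h1 : visitLe u v) (h2 : visitLe v w) : visitLe u w :=
  fun k h => h2 k (h1 k h)

lemma markedC_mono {c : List (Int × Int)} {v w : List Bool} (h : visitLe v w) {p : Int × Int}
    (hm : markedC c v p) : markedC c w p := by
  obtain ⟨k, h1, h2⟩ := hm; exact ⟨k, h1, h k h2⟩

lemma visitLe_set (v : List Bool) (cv : Nat) (hcv : cv < v.length) : visitLe v (v.set cv true) := by
  intro k hk
  rcases eq_or_ne cv k with rfl | hne
  · simp [List.getD_eq_getElem?_getD, List.getElem?_set_self hcv]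
  · simpa [List.getD_eq_getElem?_getD, List.getElem?_set_ne hne] using hk

lemma getD_set_self_true {v : List Bool} {cv : Nat} (hcv : cv < v.length) :
    (v.set cv true).getD cv false = true := by
  simp [List.getD_eq_getElem?_getD, List.getElem?_set_self hcv]

lemma getD_set_true_cases {v : List Bool} {cv k : Nat} (h : (v.set cv true).getD k false = true) :
    k = cv ∨ v.getD k false = true := by
  rcases eq_or_ne cv k with rfl | hne
  · exact Or.inl rfl
  · right; simpa [List.getD_eq_getElem?_getD, List.getElem?_set_ne hne] using h

lemma count_false_set {v : List Bool} {cv : Nat} (hcv : cv < v.length)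
    (hfalse : v.getD cv false = false) : (v.set cv true).count false < v.count false := by
  induction v generalizing cv with
  | nil => simp at hcv
  | cons a t ih =>
    cases cv with
    | zero =>
      have ha : a = false := by simpa [List.getD] using hfalse
      subst ha
      simp
    | succ n =>
      have h1 : n < t.length := by simpa using hcv
      have h2 : t.getD n false = false := by simpa [List.getD] using hfalse
      have h3 := ih h1 h2
      simp only [List.set, List.count_cons]
      omega

lemma index?_getElem_self_of_nodup {c : List (Int × Int)} (h : c.Nodup) (k : Nat)
    (hk : k < c.length) : PySem.List.index? c (c.get ⟨k, hk⟩) = some k := by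
  rw [PySem.List.index?_eq_some_iff]
  refine ⟨c.take k, c.drop (k + 1), ?_, ?_, ?_⟩
  · rw [List.get_eq_getElem, List.getElem_cons_drop]; exact (List.take_append_drop k c).symm
  · simp [List.length_take, Nat.min_eq_left hk.le]
  · intro hmem
    rw [List.mem_take_iff_getElem] at hmem
    obtain ⟨j, hj, hje⟩ := hmem
    have := (List.Nodup.getElem_inj_iff h).mp hje
    omega

lemma nodup_of_index?_self {c : List (Int × Int)}
    (h : ∀ k (hk : k < c.length), PySem.List.index? c (c.get ⟨k, hk⟩) = some k) : c.Nodup := by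
  rw [List.nodup_iff_injective_get]
  intro ⟨i, hi⟩ ⟨j, hj⟩ he
  have h1 := h i hi
  have h2 := h j hj
  rw [he, h2] at h1
  simpa using h1.symm

-- ---------- A-side invariant ----------

def measureA (st : List (Int × Int) × List Bool) : Nat := st.1.length + 2 * st.2.count false

-- the invariant of A's state between iterations of the while loop
structure InvA (c : List (Int × Int)) (c0 : Int × Int) (q : List (Int × Int))
    (v : List Bool) : Prop where
  len : v.length = 7
  mark0 : v.getD 0 false = true
  sound : ∀ k, v.getD k false = true → ∃ hk : k < c.length,
      PySem.List.index? c (c.get ⟨k, hk⟩) = some k ∧ Reach c c0 (c.get ⟨k, hk⟩)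
  qmark : ∀ p ∈ q, markedC c v p
  pend : ∀ k (hk : k < c.length), v.getD k false = true →
      c.get ⟨k, hk⟩ ∈ q ∨ ∀ p ∈ c, adjB (c.get ⟨k, hk⟩) p = true → markedC c v p

-- the weakened invariant while the cell (i, j) is being processed
structure PInv (c : List (Int × Int)) (c0 : Int × Int) (i j : Int) (q : List (Int × Int))
    (v : List Bool) : Prop where
  len : v.length = 7
  mark0 : v.getD 0 false = true
  sound : ∀ k, v.getD k false = true → ∃ hk : k < c.length,
      PySem.List.index? c (c.get ⟨k, hk⟩) = some k ∧ Reach c c0 (c.get ⟨k, hk⟩)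
  qmark : ∀ p ∈ q, markedC c v p
  pend : ∀ k (hk : k < c.length), v.getD k false = true →
      c.get ⟨k, hk⟩ ∈ q ∨ c.get ⟨k, hk⟩ = (i, j) ∨
        ∀ p ∈ c, adjB (c.get ⟨k, hk⟩) p = true → markedC c v p

lemma stepA_fact {c : List (Int × Int)} {c0 : Int × Int} {i j : Int} (hlen : c.length ≤ 7)
    (hR : Reach c c0 (i, j)) (st : List (Int × Int) × List Bool) (k : Nat) (hk4 : k < 4)
    (hI : PInv c c0 i j st.1 st.2) :
    PInv c c0 i j (stepA c i j st k).1 (stepA c i j st k).2 ∧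
    measureA (stepA c i j st k) ≤ measureA st ∧
    visitLe st.2 (stepA c i j st k).2 ∧
    (∀ p ∈ st.1, p ∈ (stepA c i j st k).1) ∧
    ((i + pyDi.getD k 0, j + pyDj.getD k 0) ∈ c →
      markedC c (stepA c i j st k).2 (i + pyDi.getD k 0, j + pyDj.getD k 0)) := by
  obtain ⟨hlen7, hm0, hsound, hqm, hpend⟩ := hI
  by_cases hmem : (i + pyDi.getD k 0, j + pyDj.getD k 0) ∈ c
  case neg =>
    have hst : stepA c i j st k = st := by
      simp only [stepA]
      rw [if_neg hmem]
    rw [hst]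
    exact ⟨⟨hlen7, hm0, hsound, hqm, hpend⟩, le_refl _, visitLe_refl _, fun p hp => hp,
      fun h => absurd h hmem⟩
  case pos =>
    obtain ⟨cv, hcv⟩ : ∃ cv, PySem.List.index? c (i + pyDi.getD k 0, j + pyDj.getD k 0) = some cv :=
      Option.isSome_iff_exists.mp ((PySem.List.index?_isSome_iff c _).mpr hmem)
    obtain ⟨hcvlt, hcveq, hcvfirst⟩ := PySem.List.getElem_of_index?_eq_some hcv
    have hcvv : cv < st.2.length := by omega
    have hget : st.2[cv]? = some (st.2.getD cv false) := by
      rw [List.getElem?_eq_getElem hcvv, List.getD_eq_getElem?_getD,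
        List.getElem?_eq_getElem hcvv]
      rfl
    by_cases hbf : st.2.getD cv false = false
    · have hstep : stepA c i j st k =
          (st.1 ++ [(i + pyDi.getD k 0, j + pyDj.getD k 0)], st.2.set cv true) := by
        rw [hbf] at hget
        simp only [stepA]
        rw [if_pos hmem, hcv]
        simp only [hget]
        simp
      have hvLe : visitLe st.2 (st.2.set cv true) := visitLe_set st.2 cv hcvv
      have hmarknew : markedC c (st.2.set cv true) (i + pyDi.getD k 0, j + pyDj.getD k 0) :=
        ⟨cv, hcv, getD_set_self_true hcvv⟩
      have hgetcv : c.get ⟨cv, hcvlt⟩ = (i + pyDi.getD k 0, j + pyDj.getD k 0) := by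
        rw [List.get_eq_getElem]; exact hcveq
      rw [hstep]
      refine ⟨⟨?_, hvLe 0 hm0, ?_, ?_, ?_⟩, ?_, hvLe, ?_, fun _ => hmarknew⟩
      · simpa using hlen7
      · intro k' hk'
        rcases getD_set_true_cases hk' with rfl | hold
        · refine ⟨hcvlt, ?_, ?_⟩
          · rw [hgetcv]; exact hcv
          · rw [hgetcv]; exact Reach.tail hR hmem (adjB_intro (i, j) k hk4)
        · exact hsound k' hold
      · intro p hp
        rcases List.mem_append.mp hp with h | h
        · exact markedC_mono hvLe (hqm p h)
        · have hpe : p = (i + pyDi.getD k 0, j + pyDj.getD k 0) := by simpa using h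
          rw [hpe]; exact hmarknew
      · intro k' hk' hkt
        rcases getD_set_true_cases hkt with rfl | hold
        · left
          rw [hgetcv]
          exact List.mem_append_right _ (by simp)
        · rcases hpend k' hk' hold with h | h | h
          · exact Or.inl (List.mem_append_left _ h)
          · exact Or.inr (Or.inl h)
          · exact Or.inr (Or.inr fun p hp ha => markedC_mono hvLe (h p hp ha))
      · have hcount := count_false_set hcvv hbf
        simp only [measureA, List.length_append, List.length_cons, List.length_nil]
        omega
      · intro p hp; exact List.mem_append_left _ hp
    · have htrue : st.2.getD cv false = true := by
        revert hbf; cases st.2.getD cv false <;> simp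
      have hstep : stepA c i j st k = st := by
        rw [htrue] at hget
        simp only [stepA]
        rw [if_pos hmem, hcv]
        simp only [hget]
        simp
      rw [hstep]
      exact ⟨⟨hlen7, hm0, hsound, hqm, hpend⟩, le_refl _, visitLe_refl _, fun p hp => hp,
        fun _ => ⟨cv, hcv, htrue⟩⟩

lemma foldA_fact {c : List (Int × Int)} {c0 : Int × Int} {i j : Int} (hlen : c.length ≤ 7)
    (hR : Reach c c0 (i, j)) :
    ∀ (ks : List Nat), (∀ k ∈ ks, k < 4) → ∀ st, PInv c c0 i j st.1 st.2 →
    PInv c c0 i j (ks.foldl (stepA c i j) st).1 (ks.foldl (stepA c i j) st).2 ∧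
    measureA (ks.foldl (stepA c i j) st) ≤ measureA st ∧
    visitLe st.2 (ks.foldl (stepA c i j) st).2 ∧
    (∀ p ∈ st.1, p ∈ (ks.foldl (stepA c i j) st).1) ∧
    (∀ k ∈ ks, (i + pyDi.getD k 0, j + pyDj.getD k 0) ∈ c →
      markedC c (ks.foldl (stepA c i j) st).2 (i + pyDi.getD k 0, j + pyDj.getD k 0)) := by
  intro ks
  induction ks with
  | nil =>
    intro _ st hI
    exact ⟨hI, le_refl _, visitLe_refl _, fun p hp => hp, by simp⟩
  | cons k ks ih =>
    intro hks st hI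
    have hk4 : k < 4 := hks k List.mem_cons_self
    have hrest : ∀ k' ∈ ks, k' < 4 := fun k' h => hks k' (List.mem_cons_of_mem _ h)
    obtain ⟨hI1, hm1, hv1, hq1, hprog1⟩ := stepA_fact hlen hR st k hk4 hI
    obtain ⟨hI2, hm2, hv2, hq2, hprog2⟩ := ih hrest (stepA c i j st k) hI1
    rw [List.foldl_cons]
    refine ⟨hI2, le_trans hm2 hm1, visitLe_trans hv1 hv2, fun p hp => hq2 p (hq1 p hp), ?_⟩
    intro k' hk' hmem
    rcases List.mem_cons.mp hk' with rfl | h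
    · exact markedC_mono hv2 (hprog1 hmem)
    · exact hprog2 k' h hmem

lemma loopA_nil (c : List (Int × Int)) (fuel : Nat) (v : List Bool) : loopA c fuel [] v = v := by
  cases fuel <;> rfl

lemma loopA_fact {c : List (Int × Int)} {c0 : Int × Int} (hlen : c.length ≤ 7) :
    ∀ (fuel : Nat) (q : List (Int × Int)) (v : List Bool), InvA c c0 q v →
      measureA (q, v) ≤ fuel →
      InvA c c0 [] (loopA c fuel q v) ∧ visitLe v (loopA c fuel q v) := by
  intro fuel
  induction fuel with
  | zero =>
    intro q v hI hm
    cases q with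
    | nil => rw [loopA_nil]; exact ⟨hI, visitLe_refl v⟩
    | cons p qs => simp [measureA] at hm
  | succ fuel ih =>
    intro q v hI hm
    cases q with
    | nil => rw [loopA_nil]; exact ⟨hI, visitLe_refl v⟩
    | cons p qs =>
      obtain ⟨i, j⟩ := p
      obtain ⟨hlen7, hm0, hsound, hqm, hpend⟩ := hI
      -- the popped cell is reachable
      obtain ⟨k0, hidx0, ht0⟩ := hqm (i, j) List.mem_cons_self
      obtain ⟨hk0lt, hk0eq, _⟩ := PySem.List.getElem_of_index?_eq_some hidx0
      obtain ⟨hk0lt', _, hreach0⟩ := hsound k0 ht0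
      have hR : Reach c c0 (i, j) := by
        have : c.get ⟨k0, hk0lt'⟩ = (i, j) := by rw [List.get_eq_getElem]; exact hk0eq
        rwa [this] at hreach0
      -- weakened invariant for the remaining queue
      have hP : PInv c c0 i j qs v := by
        refine ⟨hlen7, hm0, hsound, fun p hp => hqm p (List.mem_cons_of_mem _ hp), ?_⟩
        intro k hk hkt
        rcases hpend k hk hkt with h | h
        · rcases List.mem_cons.mp h with h' | h'
          · exact Or.inr (Or.inl h')
          · exact Or.inl h'
        · exact Or.inr (Or.inr h)
      obtain ⟨hI', hm', hv', _, hprog⟩ :=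
        foldA_fact hlen hR (List.range 4) (fun k h => List.mem_range.mp h) (qs, v) hP
      -- restore the full invariant
      have hInv' : InvA c c0 ((List.range 4).foldl (stepA c i j) (qs, v)).1
          ((List.range 4).foldl (stepA c i j) (qs, v)).2 := by
        obtain ⟨hlen7', hm0', hsound', hqm', hpend'⟩ := hI'
        refine ⟨hlen7', hm0', hsound', hqm', ?_⟩
        intro k hk hkt
        rcases hpend' k hk hkt with h | h | h
        · exact Or.inl h
        · right
          intro p hp hadj
          rw [h] at hadj
          obtain ⟨k2, hk2, rfl⟩ := adjB_elim hadj
          exact hprog k2 (List.mem_range.mpr hk2) hp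
        · exact Or.inr h
      have hm2 : measureA ((List.range 4).foldl (stepA c i j) (qs, v)) ≤ fuel := by
        have h1 : measureA ((i, j) :: qs, v) = measureA (qs, v) + 1 := by
          simp only [measureA, List.length_cons]
          omega
        omega
      have heq : loopA c (fuel + 1) ((i, j) :: qs) v =
          loopA c fuel ((List.range 4).foldl (stepA c i j) (qs, v)).1
            ((List.range 4).foldl (stepA c i j) (qs, v)).2 := rfl
      rw [heq]
      obtain ⟨hfin, hle⟩ := ih _ _ hInv' hm2
      exact ⟨hfin, visitLe_trans hv' hle⟩

lemma completeA {c : List (Int × Int)} {c0 : Int × Int} {t : List (Int × Int)}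
    (hc : c = c0 :: t) {v : List Bool} (hInv : InvA c c0 [] v) :
    ∀ p, Reach c c0 p → markedC c v p := by
  intro p hp
  induction hp with
  | refl =>
    refine ⟨0, ?_, hInv.mark0⟩
    rw [hc]
    exact PySem.List.index?_cons_self c0 t
  | tail hr hmem hadj ih =>
    rename_i pp qq
    obtain ⟨k, hidx, ht⟩ := ih
    obtain ⟨hklt, hkeq, _⟩ := PySem.List.getElem_of_index?_eq_some hidx
    rcases hInv.pend k hklt ht with h | h
    · simp at h
    · apply h _ hmem
      have hg : c.get ⟨k, hklt⟩ = pp := by rw [List.get_eq_getElem]; exact hkeq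
      rwa [hg]

lemma invA_init {c0 : Int × Int} {t : List (Int × Int)} :
    InvA (c0 :: t) c0 [c0] ((List.replicate 7 false).set 0 true) := by
  have hv0 : (List.replicate 7 false).set 0 true = true :: List.replicate 6 false := rfl
  have hgetD : ∀ k, ((List.replicate 7 false).set 0 true).getD k false = decide (k = 0) := by
    intro k
    rw [hv0]
    cases k with
    | zero => rfl
    | succ n =>
      simp only [List.getD_eq_getElem?_getD, List.getElem?_cons_succ, List.getElem?_replicate]
      split <;> rfl
  refine ⟨by rw [hv0]; rfl, by rw [hgetD]; rfl, ?_, ?_, ?_⟩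
  · intro k hk
    rw [hgetD] at hk
    have hk0 : k = 0 := by simpa using hk
    subst hk0
    refine ⟨by simp, ?_, Reach.refl⟩
    show PySem.List.index? (c0 :: t) c0 = some 0
    exact PySem.List.index?_cons_self c0 t
  · intro p hp
    have : p = c0 := by simpa using hp
    subst this
    exact ⟨0, PySem.List.index?_cons_self _ _, by rw [hgetD]; rfl⟩
  · intro k hk hkt
    rw [hgetD] at hkt
    have hk0 : k = 0 := by simpa using hkt
    subst hk0
    exact Or.inl (by simp)

-- ---------- B-side invariant ----------

structure InvB (c : List (Int × Int)) (c0 : Int × Int) (r : List (Int × Int)) : Prop where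
  nodup : r.Nodup
  sub : ∀ p ∈ r, p ∈ c
  mem0 : c0 ∈ r
  sound : ∀ p ∈ r, Reach c c0 p

lemma stepB_prefix (r : PySem.Set (Int × Int)) (p : Int × Int) : r <+: stepB r p := by
  unfold stepB
  split
  · by_cases hp : p ∈ r
    · rw [PySem.Set.add_of_mem hp]
    · rw [PySem.Set.add_of_not_mem hp]; exact ⟨[p], rfl⟩
  · exact List.prefix_refl r

lemma foldl_stepB_prefix : ∀ (l : List (Int × Int)) (r : PySem.Set (Int × Int)),
    r <+: l.foldl stepB r := by
  intro l
  induction l with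
  | nil => intro r; exact List.prefix_refl r
  | cons a l ih =>
    intro r
    rw [List.foldl_cons]
    exact (stepB_prefix r a).trans (ih (stepB r a))

lemma passB_prefix (c : List (Int × Int)) (r : PySem.Set (Int × Int)) : r <+: passB c r :=
  foldl_stepB_prefix c r

lemma stepB_invB {c : List (Int × Int)} {c0 : Int × Int} {r' : List (Int × Int)}
    (hI' : InvB c c0 r') {p : Int × Int} (hp : p ∈ c) : InvB c c0 (stepB r' p) := by
  unfold stepB
  split
  case isTrue hcond =>
    obtain ⟨hnp, hany⟩ := hcond
    rw [PySem.Set.add_of_not_mem hnp]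
    obtain ⟨k, hk4, hnb⟩ : ∃ k, k ∈ List.range 4 ∧
        (p.1 + pyDi.getD k 0, p.2 + pyDj.getD k 0) ∈ r' := by
      simpa [List.any_eq_true] using hany
    have hreach : Reach c c0 p := by
      have hnbr : Reach c c0 (p.1 + pyDi.getD k 0, p.2 + pyDj.getD k 0) := hI'.sound _ hnb
      have hadj : adjB (p.1 + pyDi.getD k 0, p.2 + pyDj.getD k 0) p = true := by
        rw [← adjB_comm]
        exact adjB_intro p k (List.mem_range.mp hk4)
      exact Reach.tail hnbr hp hadj
    refine ⟨?_, ?_, List.mem_append_left _ hI'.mem0, ?_⟩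
    · simp [List.nodup_append, hI'.nodup]
      exact fun a b hab he => hnp (he ▸ hab)
    · intro x hx
      rcases List.mem_append.mp hx with h | h
      · exact hI'.sub x h
      · have : x = p := by simpa using h
        subst this; exact hp
    · intro x hx
      rcases List.mem_append.mp hx with h | h
      · exact hI'.sound x h
      · have : x = p := by simpa using h
        subst this; exact hreach
  case isFalse => exact hI'

lemma passB_inv {c : List (Int × Int)} {c0 : Int × Int} {r : List (Int × Int)}
    (hI : InvB c c0 r) : InvB c c0 (passB c r) := by
  unfold passB
  have haux : ∀ (l : List (Int × Int)), (∀ p ∈ l, p ∈ c) → ∀ (s : List (Int × Int)),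
      InvB c c0 s → InvB c c0 (l.foldl stepB s) := by
    intro l
    induction l with
    | nil => intro _ s h; exact h
    | cons a l ih =>
      intro hsub s hI'
      rw [List.foldl_cons]
      exact ih (fun p hp => hsub p (List.mem_cons_of_mem _ hp)) _
        (stepB_invB hI' (hsub a List.mem_cons_self))
  exact haux c (fun p hp => hp) r hI

lemma foldl_stepB_eq_start : ∀ (l : List (Int × Int)) (r : PySem.Set (Int × Int)),
    l.foldl stepB r = r → ∀ q ∈ l, stepB r q = r := by
  intro l
  induction l with
  | nil => intro r _ q hq; simp at hq
  | cons a l ih =>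
    intro r h q hq
    rw [List.foldl_cons] at h
    have h1 : r <+: stepB r a := stepB_prefix r a
    have h2 : stepB r a <+: r := by
      have h2' := foldl_stepB_prefix l (stepB r a)
      rwa [h] at h2'
    have heq : stepB r a = r := h2.eq_of_length (le_antisymm h2.length_le h1.length_le)
    rcases List.mem_cons.mp hq with rfl | hq'
    · exact heq
    · exact ih r (by rwa [heq] at h) q hq'

lemma passB_fix_closed {c : List (Int × Int)} {r : List (Int × Int)} (hfix : passB c r = r) :
    ∀ q ∈ c, ((List.range 4).any fun k =>
      (q.1 + pyDi.getD k 0, q.2 + pyDj.getD k 0) ∈ r) = true → q ∈ r := by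
  intro q hqc hany
  by_contra hqr
  have hstep := foldl_stepB_eq_start c r hfix q hqc
  rw [stepB, if_pos ⟨hqr, hany⟩, PySem.Set.add_of_not_mem hqr] at hstep
  simpa using congrArg List.length hstep

def iterB (c : List (Int × Int)) (r0 : List (Int × Int)) (n : Nat) : List (Int × Int) :=
  (List.range n).foldl (fun r _ => passB c r) r0

lemma iterB_succ (c : List (Int × Int)) (r0 : List (Int × Int)) (n : Nat) :
    iterB c r0 (n + 1) = passB c (iterB c r0 n) := by
  simp [iterB, List.range_succ]

lemma iterB_invB {c : List (Int × Int)} {c0 : Int × Int} {r0 : List (Int × Int)}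
    (hI : InvB c c0 r0) (n : Nat) : InvB c c0 (iterB c r0 n) := by
  induction n with
  | zero => exact hI
  | succ n ih => rw [iterB_succ]; exact passB_inv ih

lemma iterB_fix (c : List (Int × Int)) (r0 : List (Int × Int)) (hc7 : c.length ≤ 7)
    {c0 : Int × Int} (hI : InvB c c0 r0) (h1 : r0.length = 1) :
    passB c (iterB c r0 7) = iterB c r0 7 := by
  have hbound : ∀ n, (iterB c r0 n).length ≤ 7 := by
    intro n
    have hIn := iterB_invB hI n
    have hsub : iterB c r0 n ⊆ c := fun x hx => hIn.sub x hx
    have := (List.subperm_of_subset hIn.nodup hsub).length_le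
    omega
  by_contra hne
  have hprop : ∀ n, passB c (iterB c r0 n) = iterB c r0 n →
      ∀ d, iterB c r0 (n + d) = iterB c r0 n := by
    intro n hfix d
    induction d with
    | zero => rfl
    | succ d ih => rw [show n + (d + 1) = (n + d) + 1 from rfl, iterB_succ, ih, hfix]
  have hnofix : ∀ n, n ≤ 7 → passB c (iterB c r0 n) ≠ iterB c r0 n := by
    intro n hn hfix
    apply hne
    have h7 := hprop n hfix (7 - n)
    rw [Nat.add_sub_cancel' hn] at h7
    rw [h7, hfix]
  have hgrow : ∀ n, n ≤ 7 → n + 1 ≤ (iterB c r0 n).length := by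
    intro n
    induction n with
    | zero =>
      intro _
      have h0 : iterB c r0 0 = r0 := rfl
      rw [h0]
      omega
    | succ n ih =>
      intro hn
      have hlast := ih (by omega)
      have hpre := passB_prefix c (iterB c r0 n)
      have hle := hpre.length_le
      have hne' : (iterB c r0 n).length ≠ (passB c (iterB c r0 n)).length := by
        intro hl
        exact hnofix n (by omega) (hpre.eq_of_length hl).symm
      rw [iterB_succ]
      omega
  have := hgrow 7 le_rfl
  have := hbound 7
  omega

lemma completeB {c : List (Int × Int)} {c0 : Int × Int} {r : List (Int × Int)}
    (hI : InvB c c0 r)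
    (hcl : ∀ q ∈ c, ((List.range 4).any fun k =>
      (q.1 + pyDi.getD k 0, q.2 + pyDj.getD k 0) ∈ r) = true → q ∈ r) :
    ∀ p, Reach c c0 p → p ∈ r := by
  intro p hp
  induction hp with
  | refl => exact hI.mem0
  | tail hr hmem hadj ih =>
    rename_i p' q'
    apply hcl _ hmem
    have hadj' : adjB q' p' = true := by rwa [adjB_comm] at hadj
    obtain ⟨k, hk4, hpe⟩ := adjB_elim hadj'
    simp only [List.any_eq_true, List.mem_range, decide_eq_true_eq]
    exact ⟨k, hk4, by rw [← hpe]; exact ih⟩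

-- ---------- assembling the verdict ----------

lemma all_true_getD {v : List Bool} (h : (v.all fun b => b) = true) (k : Nat) (hk : k < v.length) :
    v.getD k false = true := by
  rw [List.getD_eq_getElem?_getD, List.getElem?_eq_getElem hk]
  exact List.all_eq_true.mp h v[k] (List.getElem_mem hk)

lemma all_false_of_getD {v : List Bool} {k : Nat} (hk : k < v.length)
    (h : v.getD k false = false) : (v.all fun b => b) = false := by
  cases hall : v.all fun b => b
  · rfl
  · rw [all_true_getD hall k hk] at h; exact absurd h (by simp)

-- ===== VERDICT (by name: the statement is the Claim_ definition above) =====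
theorem bfs_spec : Claim_equal_bfs := by
  intro c hdom hpre
  obtain ⟨hne, hlen⟩ := hpre
  show bfs c = bfs_alt c
  cases c with
  | nil => exact absurd rfl hne
  | cons c0 t =>
    clear hne hdom
    set c := c0 :: t with hc
    have hA : bfs c = (loopA c 16 [c0] ((List.replicate 7 false).set 0 true)).all
        (fun b => b) := by
      rw [bfs, hc, PySem.List.pyGet?_zero_cons]
    have hmeas : measureA ([c0], (List.replicate 7 false).set 0 true) ≤ 16 := by
      simp [measureA]
    obtain ⟨hFin, hLe⟩ := loopA_fact hlen 16 [c0] _ invA_init hmeas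
    set v := loopA c 16 [c0] ((List.replicate 7 false).set 0 true) with hv
    by_cases h7 : c.length = 7
    · by_cases hnd : c.Nodup
      · -- the interesting case: 7 distinct cells
        have hofl : PySem.Set.ofList c = c := PySem.Set.ofList_eq_self_of_nodup c hnd
        have hguard : c.length = 7 ∧ (PySem.Set.ofList c).length = 7 := ⟨h7, by rw [hofl]; exact h7⟩
        have hB : bfs_alt c = decide ((iterB c (PySem.Set.ofList [c0]) 7).length = 7) := by
          rw [bfs_alt, if_pos hguard, hc]
          rfl
        have hIB : InvB c c0 [c0] := by
          refine ⟨List.nodup_singleton c0, ?_, List.mem_singleton_self c0, ?_⟩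
          · intro p hp
            have : p = c0 := by simpa using hp
            subst this; rw [hc]; exact List.mem_cons_self
          · intro p hp
            have : p = c0 := by simpa using hp
            subst this; exact Reach.refl
        have h0 : PySem.Set.ofList [c0] = [c0] := rfl
        have hfixB := iterB_fix c [c0] hlen hIB rfl
        have hIB7 := iterB_invB hIB 7
        have hclosed := passB_fix_closed hfixB
        set r := iterB c [c0] 7 with hr
        have hAiff : ((v.all fun b => b) = true) ↔ ∀ p ∈ c, Reach c c0 p := by
          constructor
          · intro hall p hp
            obtain ⟨k, hk, hke⟩ := List.mem_iff_getElem.mp hp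
            have hkv : k < v.length := by rw [hFin.len]; omega
            have hkt : v.getD k false = true := all_true_getD hall k hkv
            obtain ⟨hk2, _, hrch⟩ := hFin.sound k hkt
            have : c.get ⟨k, hk2⟩ = p := by rw [List.get_eq_getElem]; exact hke
            rwa [this] at hrch
          · intro hreach
            apply List.all_eq_true.mpr
            intro x hx
            obtain ⟨k, hkv, hke⟩ := List.mem_iff_getElem.mp hx
            have hkc : k < c.length := by rw [h7]; rw [hFin.len] at hkv; omega
            have hrch : Reach c c0 (c.get ⟨k, hkc⟩) :=
              hreach _ (List.get_mem c ⟨k, hkc⟩)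
            obtain ⟨k', hidx, ht⟩ := completeA hc hFin _ hrch
            rw [index?_getElem_self_of_nodup hnd k hkc] at hidx
            have hkk : k' = k := by simpa using hidx.symm
            subst hkk
            rw [List.getD_eq_getElem?_getD, List.getElem?_eq_getElem hkv] at ht
            rw [← hke]
            simpa using ht
        have hBiff : (decide (r.length = 7) = true) ↔ ∀ p ∈ c, Reach c c0 p := by
          rw [decide_eq_true_iff]
          constructor
          · intro hlen7 p hp
            have hsub : r ⊆ c := fun x hx => hIB7.sub x hx
            have hperm : r.Perm c :=
              (List.subperm_of_subset hIB7.nodup hsub).perm_of_length_le (by omega)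
            exact hIB7.sound p (hperm.mem_iff.mpr hp)
          · intro hreach
            have hsubc : c ⊆ r := fun p hp => completeB hIB7 hclosed p (hreach p hp)
            have h1 := (List.subperm_of_subset hnd hsubc).length_le
            have hsub : r ⊆ c := fun x hx => hIB7.sub x hx
            have h2 := (List.subperm_of_subset hIB7.nodup hsub).length_le
            omega
        rw [hA, hB]
        have hiff := hAiff.trans hBiff.symm
        cases h1 : v.all fun b => b <;> cases h2 : decide (r.length = 7) <;> simp_all
      · -- duplicates among the 7 cells: both sides return false
        have hBf : bfs_alt c = false := by
          have hg : ¬ (c.length = 7 ∧ (PySem.Set.ofList c).length = 7) := by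
            rintro ⟨_, hlset⟩
            apply hnd
            have hsub : PySem.Set.ofList c ⊆ c := fun x hx =>
              (PySem.Set.mem_ofList c x).mp hx
            have hperm : (PySem.Set.ofList c).Perm c :=
              (List.subperm_of_subset (PySem.Set.nodup_ofList c) hsub).perm_of_length_le
                (by omega)
            exact hperm.nodup (PySem.Set.nodup_ofList c)
          rw [bfs_alt, if_neg hg]
        have hk : ∃ k, ∃ hk : k < c.length, PySem.List.index? c (c.get ⟨k, hk⟩) ≠ some k := by
          by_contra hno
          push Not at hno
          exact hnd (nodup_of_index?_self hno)
        obtain ⟨k, hkc, hkne⟩ := hk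
        have hkf : v.getD k false = false := by
          cases hval : v.getD k false
          · rfl
          · obtain ⟨hk2, hidx, _⟩ := hFin.sound k hval
            exact absurd hidx hkne
        have hAf : bfs c = false := by
          rw [hA]
          exact all_false_of_getD (by rw [hFin.len]; omega) hkf
        rw [hAf, hBf]
    · -- fewer than 7 cells: both sides return false
      have hBf : bfs_alt c = false := by
        rw [bfs_alt, if_neg (by tauto)]
      have hkf : v.getD c.length false = false := by
        cases hval : v.getD c.length false
        · rfl
        · obtain ⟨hk2, _, _⟩ := hFin.sound c.length hval
          omega
      have hAf : bfs c = false := by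
        rw [hA]
        exact all_false_of_getD (by rw [hFin.len]; omega) hkf
      rw [hAf, hBf]
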